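-- pv_equiv track=rewrite | github.com/wynter598/ai_skill | sql-formatter/sql_aligner.py | _paren_delta_ignore_strings_sq
-- ===== SOURCE A (Python) =====
-- def _paren_delta_ignore_strings_sq(line: str) -> int:
--     """单行内圆括号深度变化（忽略单引号字符串内括号）。"""
--     d = 0
--     mode = "code"
--     i = 0
--     s = line.split("\n", 1)[0]
--     n = len(s)
--     while i < n:
--         ch = s[i]
--         if mode == "code":
--             if ch == "'":
--                 mode = "sq"
--                 i += 1
--                 continue
--             if ch == "(":
--                 d += 1
--             elif ch == ")":
--                 d -= 1
--             i += 1
--             continue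
--         if ch == "'" and i + 1 < n and s[i + 1] == "'":
--             i += 2
--             continue
--         if ch == "'":
--             mode = "code"
--         i += 1
--     return d
-- ===== SOURCE B (Python) =====
-- def _paren_delta_ignore_strings_sq(line: str) -> int:
--     # Split-based rewrite: quotes partition the line into alternating code/string
--     # segments ('' escapes fall out of the parity automatically); count parens
--     # only in the even-indexed (code) segments.
--     s = line.split("\n", 1)[0]
--     total = 0
--     for i, part in enumerate(s.split("'")):
--         if i % 2 == 0:
--             total += part.count("(") - part.count(")")
--     return total
-- ===== Notes on version B (the rewrite author's own statement) =====
-- stated objective: simpler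
-- what changed: Replaced the inline char-by-char quote-mode state machine (with explicit doubled-quote escape lookahead) by splitting the line on single quotes and summing paren counts over the even-indexed code segments; the doubled-quote escape is handled by split parity for free.
import Mathlib
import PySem

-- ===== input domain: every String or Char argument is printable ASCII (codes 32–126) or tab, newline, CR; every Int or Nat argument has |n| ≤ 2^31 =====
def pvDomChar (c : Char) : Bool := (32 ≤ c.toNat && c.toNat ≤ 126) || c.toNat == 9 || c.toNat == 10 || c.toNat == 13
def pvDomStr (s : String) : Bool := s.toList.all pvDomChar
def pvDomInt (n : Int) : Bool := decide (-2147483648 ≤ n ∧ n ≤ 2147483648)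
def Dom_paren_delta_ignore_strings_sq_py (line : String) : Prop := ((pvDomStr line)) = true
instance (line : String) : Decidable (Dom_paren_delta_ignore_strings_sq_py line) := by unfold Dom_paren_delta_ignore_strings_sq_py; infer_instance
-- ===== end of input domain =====

-- B replaces A's char-by-char quote state machine by split-on-quote + flat paren
-- counts over the even-indexed segments (objective: simpler; a timing run measured B faster by a constant factor).

-- ===== PORT A =====
-- the while loop of A: state = remaining chars, mode (false = "code", true = "sq"), accumulator d;
-- the sq-mode lookahead s[i+1] is the second pattern element
def pvAGo : List Char → Bool → Int → Int
  | [], _, d => d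
  | c :: rest, false, d =>
    if c = '\'' then pvAGo rest true d
    else if c = '(' then pvAGo rest false (d + 1)
    else if c = ')' then pvAGo rest false (d - 1)
    else pvAGo rest false d
  | c :: c2 :: rest2, true, d =>
    if c = '\'' then
      if c2 = '\'' then pvAGo rest2 true d else pvAGo (c2 :: rest2) false d
    else pvAGo (c2 :: rest2) true d
  | [c], true, d =>
    if c = '\'' then pvAGo [] false d else pvAGo [] true d

-- line.split("\n", 1)[0] = the prefix before the first '\n' (exact)
def paren_delta_ignore_strings_sq_py (line : String) : Int :=
  pvAGo (line.toList.takeWhile (· ≠ '\n')) false 0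

-- ===== PORT B =====
-- hand port of s.split("'") (no maxsplit); exact for a one-character separator
def pvSplitQ : List Char → List (List Char)
  | [] => [[]]
  | c :: cs =>
    if c = '\'' then [] :: pvSplitQ cs
    else
      match pvSplitQ cs with
      | p :: ps => (c :: p) :: ps
      | [] => [[c]]

-- part.count("(") - part.count(")")
def pvCnt (p : List Char) : Int := (p.count '(' : Int) - (p.count ')' : Int)

-- the enumerate loop of Source B: add pvCnt for even-indexed parts
def pvBGo : List (List Char) → Nat → Int → Int
  | [], _, t => t
  | p :: ps, i, t => pvBGo ps (i + 1) (if i % 2 = 0 then t + pvCnt p else t)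

def paren_delta_ignore_strings_sq_py_alt (line : String) : Int :=
  pvBGo (pvSplitQ (line.toList.takeWhile (· ≠ '\n'))) 0 0

-- ===== PRECONDITION & SPEC =====
def Spec_paren_delta_ignore_strings_sq_py (line : String) (out : Int) : Prop := out = paren_delta_ignore_strings_sq_py_alt line
instance (line : String) (out : Int) : Decidable (Spec_paren_delta_ignore_strings_sq_py line out) := by unfold Spec_paren_delta_ignore_strings_sq_py; infer_instance

-- ===== CLAIM (what is proved, stated in full; the proofs are below) =====
def Claim_equal_paren_delta_ignore_strings_sq_py : Prop := ∀ (line : String), Dom_paren_delta_ignore_strings_sq_py line → Spec_paren_delta_ignore_strings_sq_py line (paren_delta_ignore_strings_sq_py line)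

-- ===== LEMMAS AND PROOFS =====

-- alternating sum of paren deltas: count parts at even positions (flag false = even)
def pvAltSum : List (List Char) → Bool → Int
  | [], _ => 0
  | p :: ps, false => pvCnt p + pvAltSum ps true
  | _ :: ps, true => pvAltSum ps false

theorem pvSplitQ_ne_nil (cs : List Char) : pvSplitQ cs ≠ [] := by
  cases cs with
  | nil => simp [pvSplitQ]
  | cons c cs =>
    simp only [pvSplitQ]
    split
    · simp
    · cases h : pvSplitQ cs <;> simp

theorem pvCnt_cons (c : Char) (p : List Char) :
    pvCnt (c :: p) = (if c = '(' then 1 else if c = ')' then -1 else 0) + pvCnt p := by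
  simp only [pvCnt, List.count_cons]
  split_ifs with h1 h2 <;> simp_all <;> ring

theorem pvAGo_eq_altSum (cs : List Char) (mode : Bool) (d : Int) :
    pvAGo cs mode d = d + pvAltSum (pvSplitQ cs) mode := by
  induction cs, mode, d using pvAGo.induct with
  | case1 x d => cases x <;> simp [pvAGo, pvSplitQ, pvAltSum, pvCnt]
  | case2 rest d ih => simp [pvAGo, pvSplitQ, pvAltSum, pvCnt, ih]
  | case3 rest d _ ih =>
    obtain ⟨p, ps, hps⟩ := List.exists_cons_of_ne_nil (pvSplitQ_ne_nil rest)
    simp [pvAGo, pvSplitQ, hps, pvAltSum, pvCnt_cons, ih]; ring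
  | case4 rest d _ _ ih =>
    obtain ⟨p, ps, hps⟩ := List.exists_cons_of_ne_nil (pvSplitQ_ne_nil rest)
    simp [pvAGo, pvSplitQ, hps, pvAltSum, pvCnt_cons, ih]; ring
  | case5 c rest d h1 h2 h3 ih =>
    obtain ⟨p, ps, hps⟩ := List.exists_cons_of_ne_nil (pvSplitQ_ne_nil rest)
    simp [pvAGo, h1, h2, h3, pvSplitQ, hps, pvAltSum, pvCnt_cons, ih]
  | case6 rest2 d ih => simp [pvAGo, pvSplitQ, pvAltSum, pvCnt, ih]
  | case7 c2 rest2 d h ih =>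
    have e1 : pvAGo ('\'' :: c2 :: rest2) true d = pvAGo (c2 :: rest2) false d := by
      simp [pvAGo, h]
    have e2 : pvSplitQ ('\'' :: c2 :: rest2) = [] :: pvSplitQ (c2 :: rest2) := by
      conv_lhs => rw [pvSplitQ.eq_def]
      simp
    rw [e1, e2, ih]; simp only [pvAltSum]
  | case8 c c2 rest2 d h ih =>
    obtain ⟨p, ps, hps⟩ := List.exists_cons_of_ne_nil (pvSplitQ_ne_nil (c2 :: rest2))
    have e1 : pvAGo (c :: c2 :: rest2) true d = pvAGo (c2 :: rest2) true d := by
      simp [pvAGo, h]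
    have e2 : pvSplitQ (c :: c2 :: rest2) = (c :: p) :: ps := by
      conv_lhs => rw [pvSplitQ.eq_def]
      simp [h, hps]
    rw [e1, e2, ih, hps]; simp only [pvAltSum]
  | case9 d ih => simp [pvAGo, pvSplitQ, pvAltSum, pvCnt]
  | case10 c d h ih => simp [pvAGo, h, pvSplitQ, pvAltSum]

theorem pvBGo_eq_altSum (ps : List (List Char)) (i : Nat) (t : Int) :
    pvBGo ps i t = t + pvAltSum ps (decide (i % 2 ≠ 0)) := by
  induction ps generalizing i t with
  | nil => simp [pvBGo, pvAltSum]
  | cons p ps ih =>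
    rw [pvBGo, ih]
    by_cases h : i % 2 = 0
    · have : (i + 1) % 2 ≠ 0 := by omega
      simp [h, this, pvAltSum]; ring
    · have : (i + 1) % 2 = 0 := by omega
      simp [h, this, pvAltSum]

-- ===== VERDICT (by name: the statement is the Claim_ definition above) =====
theorem paren_delta_ignore_strings_sq_py_spec : Claim_equal_paren_delta_ignore_strings_sq_py := by
  intro line _
  unfold Spec_paren_delta_ignore_strings_sq_py paren_delta_ignore_strings_sq_py paren_delta_ignore_strings_sq_py_alt
  rw [pvAGo_eq_altSum, pvBGo_eq_altSum]
  simp
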